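-- pv_equiv track=rewrite | github.com/guoheng/EulerPy | p148.py | Pascal7
-- ===== SOURCE A (Python) =====
-- def Pascal7(rows):
--     pascal = [[1]]
--     for r in range(rows-1):
--         prow = pascal[-1]
--         nrow = []
--         for c in range(r+1):
--             if c == 0:
--                 nrow.append(1)
--             else:
--                 nrow.append((prow[c-1]+prow[c])%7)
--         nrow.append(1)
--         pascal.append(nrow)
--     return pascal
-- ===== SOURCE B (Python) =====
-- _P7 = [
--     [1, 0, 0, 0, 0, 0, 0],
--     [1, 1, 0, 0, 0, 0, 0],
--     [1, 2, 1, 0, 0, 0, 0],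
--     [1, 3, 3, 1, 0, 0, 0],
--     [1, 4, 6, 4, 1, 0, 0],
--     [1, 5, 3, 3, 5, 1, 0],
--     [1, 6, 1, 6, 1, 6, 1],
-- ]
--
--
-- def row7(n):
--     # Row n of Pascal's triangle mod 7, by Lucas' theorem:
--     # C(n, 7*j + i) = C(n // 7, j) * C(n % 7, i)  (mod 7),
--     # so row n is row (n // 7) expanded digit-wise by the small table row.
--     if n < 7:
--         return _P7[n][:n + 1]
--     q, s = divmod(n, 7)
--     pat = _P7[s]
--     return [x * c % 7 for x in row7(q) for c in pat][:n + 1]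
--
--
-- def Pascal7(rows):
--     return [row7(n) for n in range(max(1, rows))]
-- ===== Notes on version B (the rewrite author's own statement) =====
-- stated objective: alternative
-- what changed: B never adds adjacent cells of a previous row: by Lucas' theorem each row n is obtained independently, expanding row n//7 digit-wise with a fixed small table of binomial coefficients mod 7.
import Mathlib
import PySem

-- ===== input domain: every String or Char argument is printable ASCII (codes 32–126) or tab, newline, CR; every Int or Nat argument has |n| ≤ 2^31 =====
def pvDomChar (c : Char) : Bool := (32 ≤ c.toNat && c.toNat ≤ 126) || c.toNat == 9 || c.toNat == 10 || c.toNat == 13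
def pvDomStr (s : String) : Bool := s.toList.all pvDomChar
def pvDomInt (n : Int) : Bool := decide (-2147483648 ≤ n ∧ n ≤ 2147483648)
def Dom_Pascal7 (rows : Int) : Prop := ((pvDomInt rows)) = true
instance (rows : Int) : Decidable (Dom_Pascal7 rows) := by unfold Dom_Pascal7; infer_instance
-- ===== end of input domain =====

-- B builds each row independently via Lucas' theorem (digit-wise expansion of row n//7 by a
-- fixed 7x7 table) instead of adding adjacent cells of the previous row (alternative algorithm).

-- ===== PORT A =====
def Pascal7 (rows : Int) : List (List Int) :=
  (PySem.List.pyRange 0 (rows - 1) 1).foldl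
    (fun pascal r =>
      let prow := PySem.List.pyGetD pascal (-1) []
      let nrow := (PySem.List.pyRange 0 (r + 1) 1).foldl
        (fun nrow c =>
          if c == 0 then nrow ++ [1]
          else nrow ++ [PySem.Int.mod (PySem.List.pyGetD prow (c - 1) 0 + PySem.List.pyGetD prow c 0) 7])
        []
      pascal ++ [nrow ++ [1]])
    [[1]]

-- ===== PORT B =====
def lucasP7 : List (List Int) :=
  [[1, 0, 0, 0, 0, 0, 0],
   [1, 1, 0, 0, 0, 0, 0],
   [1, 2, 1, 0, 0, 0, 0],
   [1, 3, 3, 1, 0, 0, 0],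
   [1, 4, 6, 4, 1, 0, 0],
   [1, 5, 3, 3, 5, 1, 0],
   [1, 6, 1, 6, 1, 6, 1]]

def row7 (n : Int) : List Int :=
  if n < 7 then
    PySem.List.slice (PySem.List.pyGetD lucasP7 n []) none (some (n + 1))
  else
    let q := PySem.Int.floordiv n 7
    let s := PySem.Int.mod n 7
    let pat := PySem.List.pyGetD lucasP7 s []
    PySem.List.slice ((row7 q).flatMap (fun x => pat.map (fun c => PySem.Int.mod (x * c) 7)))
      none (some (n + 1))
termination_by n.toNat
decreasing_by
  rename_i h
  simp only [PySem.Int.floordiv]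
  have he : Int.fdiv n 7 = n / 7 - if 0 ≤ (7:Int) ∨ (7:Int) ∣ n then 0 else 1 := Int.fdiv_eq_ediv
  have h1 : 0 ≤ n / 7 := Int.ediv_nonneg (by omega) (by omega)
  have h2 : n / 7 < n := by
    have := Int.ediv_lt_iff_lt_mul (a := n) (b := n) (c := 7) (by omega)
    omega
  simp only [he]
  omega

def Pascal7_alt (rows : Int) : List (List Int) :=
  (PySem.List.pyRange 0 (max 1 rows) 1).map row7

-- ===== PRECONDITION & SPEC =====
def Spec_Pascal7 (rows : Int) (out : List (List Int)) : Prop := out = Pascal7_alt rows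
instance (rows : Int) (out : List (List Int)) : Decidable (Spec_Pascal7 rows out) := by unfold Spec_Pascal7; infer_instance

-- ===== CLAIM (what is proved, stated in full; the proofs are below) =====
def Claim_equal_Pascal7 : Prop := ∀ (rows : Int), Dom_Pascal7 rows → Spec_Pascal7 rows (Pascal7 rows)

-- ===== LEMMAS AND PROOFS =====

-- the mathematical row: C(n,k) mod 7 for k = 0..n
def rowB (n : Nat) : List Int := (List.range (n + 1)).map (fun k => ((n.choose k : Int)) % 7)

def triB (R : Nat) : List (List Int) := (List.range R).map rowB

lemma innerRow_eq (m : Nat) :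
    ((PySem.List.pyRange 0 ((m : Int) + 1) 1).foldl
      (fun nrow c =>
        if c == 0 then nrow ++ [1]
        else nrow ++ [PySem.Int.mod (PySem.List.pyGetD (rowB m) (c - 1) 0 + PySem.List.pyGetD (rowB m) c 0) 7])
      []) ++ [1] = rowB (m + 1) := by
  have hfun : (fun (nrow : List Int) (c : Int) =>
        if c == 0 then nrow ++ [1]
        else nrow ++ [PySem.Int.mod (PySem.List.pyGetD (rowB m) (c - 1) 0 + PySem.List.pyGetD (rowB m) c 0) 7])
      = fun nrow c => nrow ++ [if c == 0 then 1
        else PySem.Int.mod (PySem.List.pyGetD (rowB m) (c - 1) 0 + PySem.List.pyGetD (rowB m) c 0) 7] := by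
    funext nrow c
    by_cases h : c == 0 <;> simp [h]
  rw [hfun, PySem.List.foldl_append_singleton_eq_map]
  rw [show ((m : Int) + 1) = ((m + 1 : Nat) : Int) by push_cast; ring,
      PySem.List.pyRange_zero_natCast, List.map_map]
  unfold rowB
  rw [show m + 1 + 1 = (m + 1) + 1 from rfl, List.range_succ (n := m + 1), List.map_append]
  simp only [List.nil_append]
  congr 1
  · apply List.map_congr_left
    intro k hk
    simp only [List.mem_range] at hk
    simp only [Function.comp_apply]
    match k with
    | 0 => norm_num
    | (t+1) =>
      have h0 : (((t + 1 : Nat) : Int) == 0) = false := by rw [beq_eq_false_iff_ne]; omega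
      rw [h0]
      simp only [Bool.false_eq_true, if_false]
      have hc1 : ((t + 1 : Nat) : Int) - 1 = ((t : Nat) : Int) := by push_cast; ring
      rw [hc1, PySem.List.pyGetD_natCast, PySem.List.pyGetD_natCast]
      rw [List.getD_eq_getElem _ _ (by simpa using by omega),
          List.getD_eq_getElem _ _ (by simpa using by omega)]
      simp only [List.getElem_map, List.getElem_range]
      rw [PySem.Int.mod_eq_emod_of_pos (by norm_num)]
      rw [← Int.add_emod]
      rw [show ((m.choose t : Int) + (m.choose (t+1) : Int)) = ((m.choose t + m.choose (t+1) : Nat) : Int) by push_cast; ring]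
      rw [← Nat.choose_succ_succ]
  · simp [Nat.choose_self]

lemma outer_inv (m : Nat) :
    (PySem.List.pyRange 0 (m : Int) 1).foldl
      (fun pascal r =>
        let prow := PySem.List.pyGetD pascal (-1) []
        let nrow := (PySem.List.pyRange 0 (r + 1) 1).foldl
          (fun nrow c =>
            if c == 0 then nrow ++ [1]
            else nrow ++ [PySem.Int.mod (PySem.List.pyGetD prow (c - 1) 0 + PySem.List.pyGetD prow c 0) 7])
          []
        pascal ++ [nrow ++ [1]])
      [[1]] = triB (m + 1) := by
  induction m with
  | zero =>
    rw [PySem.List.pyRange_one_eq_nil (by omega)]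
    simp [triB, rowB]
  | succ m ih =>
    rw [show ((m + 1 : Nat) : Int) = (m : Int) + 1 by push_cast; ring,
        PySem.List.pyRange_one_succ_right (by positivity), List.foldl_append, ih]
    simp only [List.foldl_cons, List.foldl_nil]
    have hlast : PySem.List.pyGetD (triB (m + 1)) (-1) [] = rowB m := by
      have : triB (m + 1) = triB m ++ [rowB m] := by
        simp [triB, List.range_succ]
      rw [this, PySem.List.pyGetD_neg_one_append_singleton]
    rw [hlast, innerRow_eq m]
    simp [triB, List.range_succ]

lemma table_row (s : Nat) (hs : s < 7) :
    PySem.List.pyGetD lucasP7 (s : Int) [] = (List.range 7).map (fun i => ((s.choose i : Int)) % 7) := by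
  interval_cases s <;> decide

lemma row7_small (n : Nat) (hn : n < 7) : row7 (n : Int) = rowB n := by
  interval_cases n <;> (rw [row7]; decide)

lemma getElem_flatMap_seven {α β : Type} (l : List α) (f : α → List β)
    (hf : ∀ a, (f a).length = 7) :
    ∀ (j i : Nat) (hj : j < l.length) (hi : i < 7)
      (hidx : 7 * j + i < (l.flatMap f).length),
      (l.flatMap f)[7 * j + i]'hidx = (f (l[j]'hj))[i]'(by rw [hf]; exact hi) := by
  induction l with
  | nil => intro j i hj; simp at hj
  | cons a t ih =>
    intro j i hj hi hidx
    match j with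
    | 0 =>
      simp only [List.flatMap_cons]
      rw [List.getElem_append_left (by rw [hf]; omega)]
      simp
    | (j'+1) =>
      simp only [List.flatMap_cons]
      have hlen : (f a).length = 7 := hf a
      have heq : 7 * (j' + 1) + i = (f a).length + (7 * j' + i) := by omega
      have hidx' : 7 * j' + i < (t.flatMap f).length := by
        simp only [List.flatMap_cons, List.length_append] at hidx
        omega
      rw [List.getElem_append_right (by omega)]
      simp only [show 7 * (j' + 1) + i - (f a).length = 7 * j' + i from by omega]
      rw [ih j' i (by simpa using hj) hi hidx']
      simp

lemma length_flatMap_seven {α β : Type} (l : List α) (f : α → List β)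
    (hf : ∀ a, (f a).length = 7) : (l.flatMap f).length = 7 * l.length := by
  rw [List.length_flatMap]
  induction l with
  | nil => simp
  | cons a t ih => simp [ih, hf a]; ring

lemma lucas7 (n k : Nat) :
    ((n.choose k : Int)) % 7
      = (((n % 7).choose (k % 7) : Int) * ((n / 7).choose (k / 7) : Int)) % 7 := by
  haveI : Fact (Nat.Prime 7) := ⟨by norm_num⟩
  have h : n.choose k % 7 = ((n % 7).choose (k % 7) * (n / 7).choose (k / 7)) % 7 :=
    Choose.choose_modEq_choose_mod_mul_choose_div_nat
  have := congrArg (fun x : Nat => (x : Int)) h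
  push_cast at this
  exact this

lemma row7_step (n : Nat) (h : 7 ≤ n) (ih : row7 ((n / 7 : Nat) : Int) = rowB (n / 7)) :
    row7 (n : Int) = rowB n := by
  rw [row7]
  rw [if_neg (by omega)]
  have hq : PySem.Int.floordiv (n : Int) 7 = ((n / 7 : Nat) : Int) := by
    rw [PySem.Int.floordiv]
    rw [Int.fdiv_eq_ediv, Int.natCast_div]
    simp
  have hs : PySem.Int.mod (n : Int) 7 = ((n % 7 : Nat) : Int) := by
    rw [PySem.Int.mod_eq_emod_of_pos (by norm_num)]
    push_cast [Int.natCast_mod]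
    rfl
  simp only [hq, hs, ih, table_row (n % 7) (Nat.mod_lt _ (by norm_num))]
  rw [show ((n : Int) + 1) = ((n + 1 : Nat) : Int) from by push_cast; ring,
      PySem.List.slice_to_natCast]
  -- now: (rowB (n/7)).flatMap (fun x => ((range 7).map g).map (fun c => mod (x*c) 7)) |>.take (n+1) = rowB n
  have hflen : ∀ x : Int, ((((List.range 7).map (fun i => (((n % 7).choose i : Int)) % 7)).map
      (fun c => PySem.Int.mod (x * c) 7)).length) = 7 := by intro x; simp
  apply List.ext_getElem
  · rw [List.length_take, length_flatMap_seven _ _ hflen]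
    simp [rowB]
    omega
  · intro k hk _
    rw [List.getElem_take]
    have hk' : k < n + 1 := by
      rw [List.length_take] at hk
      omega
    have hkd : k = 7 * (k / 7) + k % 7 := by omega
    have hjlt : k / 7 < (rowB (n / 7)).length := by
      simp [rowB]
      omega
    have hrw : ∀ (hh : 7 * (k / 7) + k % 7 < (List.flatMap
          (fun x => List.map (fun c => PySem.Int.mod (x * c) 7)
            (List.map (fun i => ((((n % 7)).choose i : Int)) % 7) (List.range 7)))
          (rowB (n / 7))).length) (hh2 : k < (List.flatMap
          (fun x => List.map (fun c => PySem.Int.mod (x * c) 7)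
            (List.map (fun i => ((((n % 7)).choose i : Int)) % 7) (List.range 7)))
          (rowB (n / 7))).length), (List.flatMap
          (fun x => List.map (fun c => PySem.Int.mod (x * c) 7)
            (List.map (fun i => ((((n % 7)).choose i : Int)) % 7) (List.range 7)))
          (rowB (n / 7)))[k]'hh2 = (List.flatMap
          (fun x => List.map (fun c => PySem.Int.mod (x * c) 7)
            (List.map (fun i => ((((n % 7)).choose i : Int)) % 7) (List.range 7)))
          (rowB (n / 7)))[7 * (k / 7) + k % 7]'hh := by
      intro hh hh2
      congr 1
    rw [hrw (by rw [length_flatMap_seven _ _ hflen]; simp [rowB]; omega),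
        getElem_flatMap_seven _ _ hflen (k / 7) (k % 7) hjlt (by omega)]
    simp only [rowB, List.getElem_map, List.getElem_range]
    rw [PySem.Int.mod_eq_emod_of_pos (by norm_num)]
    rw [lucas7 n k, Int.mul_emod, Int.emod_emod_of_dvd _ (by norm_num), Int.emod_emod_of_dvd _ (by norm_num), ← Int.mul_emod]
    ring_nf

lemma row7_eq (n : Nat) : row7 (n : Int) = rowB n := by
  induction n using Nat.strong_induction_on with
  | _ n ih =>
    by_cases h : n < 7
    · exact row7_small n h
    · exact row7_step n (by omega) (ih (n / 7) (by omega))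

lemma alt_eq_triB (rows : Int) : Pascal7_alt rows = triB (max 1 rows).toNat := by
  unfold Pascal7_alt triB
  rw [show (max 1 rows) = (((max 1 rows).toNat : Nat) : Int) by omega,
      PySem.List.pyRange_zero_natCast, List.map_map]
  apply List.map_congr_left
  intro k _
  exact row7_eq k

-- ===== VERDICT (by name: the statement is the Claim_ definition above) =====
theorem Pascal7_spec : Claim_equal_Pascal7 := by
  intro rows _
  show Pascal7 rows = Pascal7_alt rows
  rw [alt_eq_triB]
  unfold Pascal7
  by_cases h : rows ≤ 1
  · rw [PySem.List.pyRange_one_eq_nil (by omega)]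
    have : (max 1 rows).toNat = 1 := by omega
    rw [this]; rfl
  · have hm : rows - 1 = ((rows - 1).toNat : Int) := by omega
    rw [hm, outer_inv]
    congr 1
    omega
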